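-- pv_equiv track=rewrite | github.com/mciliv/data-structures-and-algorithms | python/min-moves/min_moves.py | min_moves_given_set
-- ===== SOURCE A (Python) =====
-- BOARD_DIM = 8
--
-- def new_positions(move_set, start, tried_positions):
--     """returns the moves given a piece's starting position and it's set of
--         moves"""
--     new_positions_set = set()
--     for move in move_set:
--         new_position = (move[0] + start[0], move[1] + start[1])
--         if new_position[0] >= 0 and new_position[0] < BOARD_DIM and \
--             new_position[1] >= 0 and new_position[1] < BOARD_DIM and \
--             new_position not in tried_positions:
--             new_positions_set.add(new_position)
--
--     return new_positions_set
--
-- def min_moves_given_set(move_set, start, goal):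
--     """returns the min number of moves to get from the start position to
--         the goal position on an 8x8 chessboard given move_set. If 'goal' can
--         not be reached then 'None' is returned"""
--     min_moves_num = 0
--     positions = {start}
--     tried_positions = set()
--     next_positions = set()
--     while True:
--         if len(positions) == 0:
--             return None
--
--         for position in positions:
--             if position == goal:
--                 return min_moves_num
--             tried_positions.add(position)
--             subsequent_positions = new_positions(move_set, position, \
--                                                  tried_positions)
--             next_positions = next_positions.union(subsequent_positions)
--
--         positions = next_positions
--         next_positions = set()
--         min_moves_num += 1
-- ===== SOURCE B (Python) =====
-- BOARD_DIM = 8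
--
--
-- def min_moves_given_set(move_set, start, goal):
--     """Single-queue BFS: each node carries its own distance; positions are
--         marked visited when enqueued, so every square enters the queue at
--         most once.  Returns the min number of moves from start to goal on an
--         8x8 board, or None if goal is unreachable."""
--     queue = [(start, 0)]
--     visited = {start}
--     i = 0
--     while i < len(queue):
--         pos, dist = queue[i]
--         i += 1
--         if pos == goal:
--             return dist
--         for move in move_set:
--             nxt = (move[0] + pos[0], move[1] + pos[1])
--             if 0 <= nxt[0] < BOARD_DIM and 0 <= nxt[1] < BOARD_DIM \
--                     and nxt not in visited:
--                 visited.add(nxt)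
--                 queue.append((nxt, dist + 1))
--     return None
-- ===== Notes on version B (the rewrite author's own statement) =====
-- stated objective: alternative
-- what changed: Replaced the level-synchronous two-frontier-set loop (per-level move counter, 'tried' set updated mid-level, frontier sets unioned and swapped each round, which can re-expand a square at several levels) with a single queue-based BFS that stores a distance on every queued node and marks squares visited at enqueue time, so each square is processed at most once.
import Mathlib
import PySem

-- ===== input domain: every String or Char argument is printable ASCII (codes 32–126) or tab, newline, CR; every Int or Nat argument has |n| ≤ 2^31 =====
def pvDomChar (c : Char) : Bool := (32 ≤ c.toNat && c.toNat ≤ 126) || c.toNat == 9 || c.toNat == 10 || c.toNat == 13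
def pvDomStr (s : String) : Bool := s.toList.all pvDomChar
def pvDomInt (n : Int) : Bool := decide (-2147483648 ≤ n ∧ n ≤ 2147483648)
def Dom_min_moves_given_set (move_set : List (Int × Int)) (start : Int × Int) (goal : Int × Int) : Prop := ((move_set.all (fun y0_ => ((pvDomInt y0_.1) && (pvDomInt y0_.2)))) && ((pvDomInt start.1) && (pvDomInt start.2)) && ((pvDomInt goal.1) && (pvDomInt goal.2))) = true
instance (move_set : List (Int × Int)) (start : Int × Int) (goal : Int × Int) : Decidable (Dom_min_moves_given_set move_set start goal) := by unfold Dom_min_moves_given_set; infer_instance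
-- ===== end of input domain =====

-- B replaces A's level-synchronous two-frontier-set BFS (per-level counter, frontiers
-- unioned and swapped each round) by a single-queue BFS with a per-node distance and
-- visited-on-enqueue; same return value on every input (proved below).
-- A's 'while True' loop is ported with a fuel counter (200) that is never exhausted:
-- the proofs below show both loops answer before the fuel runs out.

-- ===== PORT A =====
def new_positions (move_set : List (Int × Int)) (start : Int × Int)
    (tried_positions : PySem.Set (Int × Int)) : PySem.Set (Int × Int) :=
  move_set.foldl (fun new_positions_set move =>
      let new_position : Int × Int := (move.1 + start.1, move.2 + start.2)
      if (decide (new_position.1 ≥ 0) && decide (new_position.1 < 8) &&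
          decide (new_position.2 ≥ 0) && decide (new_position.2 < 8) &&
          !(PySem.Set.contains tried_positions new_position)) then
        PySem.Set.add new_positions_set new_position
      else new_positions_set)
    PySem.Set.empty

-- the 'for position in positions' body of A; 'none' = the early 'return min_moves_num'
def pvALevel (move_set : List (Int × Int)) (goal : Int × Int) :
    List (Int × Int) → PySem.Set (Int × Int) → PySem.Set (Int × Int) →
    Option (PySem.Set (Int × Int) × PySem.Set (Int × Int))
  | [], tried_positions, next_positions => some (tried_positions, next_positions)
  | position :: rest, tried_positions, next_positions =>
    if position = goal then none
    else
      pvALevel move_set goal rest (PySem.Set.add tried_positions position)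
        (PySem.Set.union next_positions
          (new_positions move_set position (PySem.Set.add tried_positions position)))

def pvALoop (move_set : List (Int × Int)) (goal : Int × Int) :
    Nat → Int → PySem.Set (Int × Int) → PySem.Set (Int × Int) → Option Int
  | 0, _, _, _ => none
  | fuel + 1, min_moves_num, positions, tried_positions =>
    if positions.length = 0 then none
    else
      match pvALevel move_set goal positions tried_positions PySem.Set.empty with
      | none => some min_moves_num
      | some (tried', next') =>
          pvALoop move_set goal fuel (min_moves_num + 1) next' tried'

def min_moves_given_set (move_set : List (Int × Int)) (start : Int × Int) (goal : Int × Int) : Option Int :=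
  pvALoop move_set goal 200 0 (PySem.Set.ofList [start]) PySem.Set.empty

-- ===== PORT B =====
def pvBLoop (move_set : List (Int × Int)) (goal : Int × Int) :
    Nat → List ((Int × Int) × Int) → PySem.Set (Int × Int) → Option Int
  | 0, _, _ => none
  | _ + 1, [], _ => none
  | fuel + 1, (pos, dist) :: queue_rest, visited =>
    if pos = goal then some dist
    else
      let st :=
        move_set.foldl
          (fun (st : List ((Int × Int) × Int) × PySem.Set (Int × Int)) move =>
            let nxt : Int × Int := (move.1 + pos.1, move.2 + pos.2)
            if (decide (0 ≤ nxt.1) && decide (nxt.1 < 8) &&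
                decide (0 ≤ nxt.2) && decide (nxt.2 < 8) &&
                !(PySem.Set.contains st.2 nxt)) then
              (st.1 ++ [(nxt, dist + 1)], PySem.Set.add st.2 nxt)
            else st)
          (queue_rest, visited)
      pvBLoop move_set goal fuel st.1 st.2

def min_moves_given_set_alt (move_set : List (Int × Int)) (start : Int × Int) (goal : Int × Int) : Option Int :=
  pvBLoop move_set goal 200 [(start, 0)] (PySem.Set.ofList [start])

-- ===== PRECONDITION & SPEC =====
def Spec_min_moves_given_set (move_set : List (Int × Int)) (start : Int × Int) (goal : Int × Int) (out : Option Int) : Prop := out = min_moves_given_set_alt move_set start goal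
instance (move_set : List (Int × Int)) (start : Int × Int) (goal : Int × Int) (out : Option Int) : Decidable (Spec_min_moves_given_set move_set start goal out) := by unfold Spec_min_moves_given_set; infer_instance

-- ===== CLAIM (what is proved, stated in full; the proofs are below) =====
def Claim_equal_min_moves_given_set : Prop := ∀ (move_set : List (Int × Int)) (start : Int × Int) (goal : Int × Int), Dom_min_moves_given_set move_set start goal → Spec_min_moves_given_set move_set start goal (min_moves_given_set move_set start goal)

-- ===== LEMMAS AND PROOFS =====

-- the move graph: x is a board square reachable from q in one move of move_set
def pvNbr (move_set : List (Int × Int)) (q x : Int × Int) : Prop :=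
  ∃ m ∈ move_set, x = (m.1 + q.1, m.2 + q.2) ∧ 0 ≤ x.1 ∧ x.1 < 8 ∧ 0 ≤ x.2 ∧ x.2 < 8

-- x is reachable from s in exactly n moves (intermediate squares on the board)
inductive pvReach (move_set : List (Int × Int)) (s : Int × Int) : Int → Int × Int → Prop
  | zero : pvReach move_set s 0 s
  | succ {n : Int} {q x : Int × Int} :
      pvReach move_set s n q → pvNbr move_set q x → pvReach move_set s (n + 1) x

-- n is the minimal number of moves from s to x
def pvMinLvl (move_set : List (Int × Int)) (s : Int × Int) (n : Int) (x : Int × Int) : Prop :=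
  pvReach move_set s n x ∧ ∀ k, k < n → ¬ pvReach move_set s k x

-- the common functional specification both loops are proved to satisfy
def pvAns (move_set : List (Int × Int)) (s g : Int × Int) (o : Option Int) : Prop :=
  (∀ d, o = some d → pvMinLvl move_set s d g) ∧
  (o = none → ∀ n, ¬ pvReach move_set s n g)

-- every square either algorithm can ever hold: the start plus the 64 board squares
def pvU (s : Int × Int) : List (Int × Int) :=
  s :: (List.range 64).map (fun k => (((k / 8 : Nat) : Int), ((k % 8 : Nat) : Int)))

lemma pv_U_length (s : Int × Int) : (pvU s).length = 65 := by
  simp [pvU]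

lemma pv_contains_iff (s : PySem.Set (Int × Int)) (x : Int × Int) :
    PySem.Set.contains s x = true ↔ x ∈ s := by
  simp [PySem.Set.contains]

lemma pv_add_not_mem (s : PySem.Set (Int × Int)) (x : Int × Int) (h : x ∉ s) :
    PySem.Set.add s x = s ++ [x] := by
  simp [PySem.Set.add, h]

lemma pv_reach_nonneg {move_set : List (Int × Int)} {s : Int × Int} {n : Int} {p : Int × Int}
    (h : pvReach move_set s n p) : 0 ≤ n := by
  induction h with
  | zero => omega
  | succ _ _ ih => omega

lemma pv_reach_zero {move_set : List (Int × Int)} {s : Int × Int} {n : Int} {p : Int × Int}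
    (h : pvReach move_set s n p) (hn : n = 0) : p = s := by
  cases h with
  | zero => rfl
  | succ hq hnb => exact absurd (pv_reach_nonneg hq) (by omega)

lemma pv_reach_succ_inv {move_set : List (Int × Int)} {s : Int × Int} {n : Int} {x : Int × Int}
    (h : pvReach move_set s n x) (hn : 0 < n) :
    ∃ q, pvReach move_set s (n - 1) q ∧ pvNbr move_set q x := by
  cases h with
  | zero => exact absurd hn (by omega)
  | succ hq hnb => exact ⟨_, by simpa using hq, hnb⟩

lemma pv_min_exists {move_set : List (Int × Int)} {s : Int × Int} {n : Int} {p : Int × Int}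
    (h : pvReach move_set s n p) : ∃ k, k ≤ n ∧ pvMinLvl move_set s k p := by
  obtain ⟨lb, hlb, hmin⟩ := Int.exists_least_of_bdd
    (P := fun k : Int => pvReach move_set s k p)
    ⟨0, fun z hz => pv_reach_nonneg hz⟩ ⟨n, h⟩
  exact ⟨lb, hmin n h, hlb, fun k hk hr => absurd (hmin k hr) (by omega)⟩

lemma pv_ans_unique {move_set : List (Int × Int)} {s g : Int × Int} {o₁ o₂ : Option Int}
    (h₁ : pvAns move_set s g o₁) (h₂ : pvAns move_set s g o₂) : o₁ = o₂ := by
  cases o₁ with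
  | none =>
    cases o₂ with
    | none => rfl
    | some d => exact absurd (h₂.1 d rfl).1 (h₁.2 rfl d)
  | some d =>
    cases o₂ with
    | none => exact absurd (h₁.1 d rfl).1 (h₂.2 rfl d)
    | some d' =>
      obtain ⟨r1, m1⟩ := h₁.1 d rfl
      obtain ⟨r2, m2⟩ := h₂.1 d' rfl
      have : d = d' := by
        rcases lt_trichotomy d d' with h | h | h
        · exact absurd r1 (m2 d h)
        · exact h
        · exact absurd r2 (m1 d' h)
      rw [this]

lemma pv_nbr_mem_U {move_set : List (Int × Int)} {q x : Int × Int} (s : Int × Int)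
    (h : pvNbr move_set q x) : x ∈ pvU s := by
  obtain ⟨m, _, _, h1, h2, h3, h4⟩ := h
  obtain ⟨a, b⟩ := x
  simp only at h1 h2 h3 h4
  have hmem : (a, b) ∈ (List.range 64).map
      (fun k => (((k / 8 : Nat) : Int), ((k % 8 : Nat) : Int))) := by
    rw [List.mem_map]
    refine ⟨a.toNat * 8 + b.toNat, ?_, ?_⟩
    · rw [List.mem_range]; omega
    · simp only [Prod.mk.injEq]
      constructor <;> omega
  exact List.mem_cons_of_mem _ hmem

lemma pv_mem_new_positions (move_set : List (Int × Int)) (p : Int × Int)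
    (tried : PySem.Set (Int × Int)) (x : Int × Int) :
    x ∈ new_positions move_set p tried ↔ pvNbr move_set p x ∧ x ∉ tried := by
  have aux : ∀ (l : List (Int × Int)) (acc : PySem.Set (Int × Int)),
      x ∈ l.foldl (fun new_positions_set move =>
        let new_position : Int × Int := (move.1 + p.1, move.2 + p.2)
        if (decide (new_position.1 ≥ 0) && decide (new_position.1 < 8) &&
            decide (new_position.2 ≥ 0) && decide (new_position.2 < 8) &&
            !(PySem.Set.contains tried new_position)) then
          PySem.Set.add new_positions_set new_position
        else new_positions_set) acc ↔
      x ∈ acc ∨ ((∃ m ∈ l, x = (m.1 + p.1, m.2 + p.2) ∧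
          0 ≤ x.1 ∧ x.1 < 8 ∧ 0 ≤ x.2 ∧ x.2 < 8) ∧ x ∉ tried) := by
    intro l
    induction l with
    | nil => simp
    | cons m l ih =>
      intro acc
      rw [List.foldl_cons, ih]
      by_cases hc : (decide ((m.1 + p.1, m.2 + p.2).1 ≥ 0) && decide ((m.1 + p.1, m.2 + p.2).1 < 8) &&
          decide ((m.1 + p.1, m.2 + p.2).2 ≥ 0) && decide ((m.1 + p.1, m.2 + p.2).2 < 8) &&
          !(PySem.Set.contains tried (m.1 + p.1, m.2 + p.2))) = true
      · simp only [hc, if_pos, PySem.Set.mem_add]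
        simp only [Bool.and_eq_true, decide_eq_true_eq, Bool.not_eq_true',
          Bool.not_eq_true, ← pv_contains_iff tried] at hc ⊢
        constructor
        · rintro ((hx | rfl) | h)
          · exact Or.inl hx
          · refine Or.inr ⟨⟨m, List.mem_cons_self .., rfl, ?_, ?_, ?_, ?_⟩, ?_⟩ <;>
              simp_all
          · rcases h with ⟨⟨m', hm', hxeq, hb⟩, hnt⟩
            exact Or.inr ⟨⟨m', List.mem_cons_of_mem _ hm', hxeq, hb⟩, hnt⟩
        · rintro (hx | ⟨⟨m', hm', hxeq, hb⟩, hnt⟩)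
          · exact Or.inl (Or.inl hx)
          · rcases List.mem_cons.mp hm' with rfl | hm'
            · exact Or.inl (Or.inr hxeq)
            · exact Or.inr ⟨⟨m', hm', hxeq, hb⟩, hnt⟩
      · simp only [hc, if_neg, Bool.false_eq_true, not_false_iff]
        constructor
        · rintro (hx | h)
          · exact Or.inl hx
          · rcases h with ⟨⟨m', hm', hxeq, hb⟩, hnt⟩
            exact Or.inr ⟨⟨m', List.mem_cons_of_mem _ hm', hxeq, hb⟩, hnt⟩
        · rintro (hx | ⟨⟨m', hm', hxeq, hb⟩, hnt⟩)
          · exact Or.inl hx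
          · rcases List.mem_cons.mp hm' with rfl | hm'
            · exfalso
              apply hc
              obtain ⟨b1, b2, b3, b4⟩ := hb
              have hcf : PySem.Set.contains tried x = false := by
                cases hcc : PySem.Set.contains tried x with
                | false => rfl
                | true => exact absurd ((pv_contains_iff _ _).mp hcc) hnt
              subst hxeq
              simp only [ge_iff_le, hcf, Bool.not_false, Bool.and_true,
                Bool.and_eq_true, decide_eq_true_eq]
              exact ⟨⟨⟨b1, b2⟩, b3⟩, b4⟩
            · exact Or.inr ⟨⟨m', hm', hxeq, hb⟩, hnt⟩
  rw [new_positions, aux]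
  simp [pvNbr, PySem.Set.empty]

lemma pv_aLevel_found (move_set : List (Int × Int)) (g : Int × Int) :
    ∀ (Pl : List (Int × Int)) (tried next : PySem.Set (Int × Int)), g ∈ Pl →
    pvALevel move_set g Pl tried next = none := by
  intro Pl
  induction Pl with
  | nil => intro _ _ h; simp at h
  | cons p rest ih =>
    intro tried next hg
    by_cases hpg : p = g
    · simp [pvALevel, hpg]
    · rcases List.mem_cons.mp hg with rfl | hg'
      · exact absurd rfl hpg
      · simp only [pvALevel, if_neg hpg]
        exact ih _ _ hg'

lemma pv_aLevel_spec (move_set : List (Int × Int)) (g : Int × Int) :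
    ∀ (Pl : List (Int × Int)) (tried next : PySem.Set (Int × Int)), g ∉ Pl →
    ∃ tried' next',
      pvALevel move_set g Pl tried next = some (tried', next') ∧
      (∀ x, x ∈ tried' ↔ x ∈ tried ∨ x ∈ Pl) ∧
      (∀ x, x ∈ next' → x ∈ next ∨ ∃ p ∈ Pl, pvNbr move_set p x ∧ x ∉ tried) ∧
      (∀ p ∈ Pl, ∀ x, pvNbr move_set p x → x ∈ next' ∨ x ∈ tried ∨ x ∈ Pl) ∧
      (∀ x ∈ next, x ∈ next') ∧
      (tried.Nodup → tried'.Nodup) := by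
  intro Pl
  induction Pl with
  | nil =>
    intro tried next _
    exact ⟨tried, next, rfl, by simp, fun x hx => Or.inl hx, by simp, fun x hx => hx, fun h => h⟩
  | cons p rest ih =>
    intro tried next hg
    have hpg : p ≠ g := fun h => hg (h ▸ List.mem_cons_self ..)
    have hgr : g ∉ rest := fun h => hg (List.mem_cons_of_mem _ h)
    obtain ⟨tried', next', heq, c1, c2, c3, c4, c5⟩ :=
      ih (PySem.Set.add tried p)
        (PySem.Set.union next (new_positions move_set p (PySem.Set.add tried p))) hgr
    refine ⟨tried', next', ?_, ?_, ?_, ?_, ?_, ?_⟩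
    · simp only [pvALevel, if_neg hpg]
      exact heq
    · intro x
      rw [c1, PySem.Set.mem_add]
      simp only [List.mem_cons]
      tauto
    · intro x hx
      rcases c2 x hx with hx' | ⟨q, hq, hnb, hnt⟩
      · rcases (PySem.Set.mem_union _ _ _).mp hx' with h | h
        · exact Or.inl h
        · obtain ⟨hnb, hnt⟩ := (pv_mem_new_positions _ _ _ _).mp h
          refine Or.inr ⟨p, List.mem_cons_self .., hnb, fun hxt => hnt ?_⟩
          rw [PySem.Set.mem_add]
          exact Or.inl hxt
      · refine Or.inr ⟨q, List.mem_cons_of_mem _ hq, hnb, fun hxt => hnt ?_⟩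
        rw [PySem.Set.mem_add]
        exact Or.inl hxt
    · intro p' hp' x hnb
      rcases List.mem_cons.mp hp' with rfl | hp'
      · by_cases hxt : x ∈ PySem.Set.add tried p'
        · rcases (PySem.Set.mem_add _ _ _).mp hxt with h | rfl
          · exact Or.inr (Or.inl h)
          · exact Or.inr (Or.inr (List.mem_cons_self ..))
        · left
          apply c4
          rw [PySem.Set.mem_union]
          exact Or.inr ((pv_mem_new_positions _ _ _ _).mpr ⟨hnb, hxt⟩)
      · rcases c3 p' hp' x hnb with h | h | h
        · exact Or.inl h
        · rcases (PySem.Set.mem_add _ _ _).mp h with h' | rfl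
          · exact Or.inr (Or.inl h')
          · exact Or.inr (Or.inr (List.mem_cons_self ..))
        · exact Or.inr (Or.inr (List.mem_cons_of_mem _ h))
    · intro x hx
      apply c4
      rw [PySem.Set.mem_union]
      exact Or.inl hx
    · intro h
      exact c5 (PySem.Set.nodup_add _ _ h)

-- a set of squares containing s and closed under moves contains every reachable square
lemma pv_reach_closed (move_set : List (Int × Int)) (s : Int × Int)
    (T : List (Int × Int)) (hs : s ∈ T)
    (hcl : ∀ p ∈ T, ∀ x, pvNbr move_set p x → x ∈ T) :
    ∀ n p, pvReach move_set s n p → p ∈ T := by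
  intro n p h
  induction h with
  | zero => exact hs
  | succ hq hnb ih => exact hcl _ ih _ hnb

lemma pv_aLoop_correct (move_set : List (Int × Int)) (s g : Int × Int) :
    ∀ (fuel : Nat) (d : Int) (Pl tried : PySem.Set (Int × Int)),
    0 ≤ d →
    (∀ p ∈ Pl, pvReach move_set s d p) →
    (∀ p, pvMinLvl move_set s d p → p ∈ Pl) →
    (∀ p ∈ tried, ∃ k, k < d ∧ pvReach move_set s k p) →
    (∀ k, k < d → ¬ pvReach move_set s k g) →
    (∀ p ∈ tried, ∀ x, pvNbr move_set p x → x ∈ tried ∨ x ∈ Pl) →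
    (s ∈ tried ∨ s ∈ Pl) →
    (∀ p ∈ tried, p ∈ pvU s) →
    (∀ p ∈ Pl, p ∈ pvU s) →
    (∀ p k, pvMinLvl move_set s k p → k < d → p ∈ tried) →
    tried.Nodup →
    2 * ((pvU s).length - tried.length) + 2 ≤ fuel →
    pvAns move_set s g (pvALoop move_set g fuel d Pl tried) := by
  intro fuel
  induction fuel with
  | zero =>
    intro d Pl tried _ _ _ _ _ _ _ _ _ _ _ HF
    exact absurd HF (by omega)
  | succ fuel ih =>
    intro d Pl tried I0 I1 I2 I3 I4 I5 I6 I7 I7b I8 IN HF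
    by_cases hPl : Pl.length = 0
    · have hnil := List.length_eq_zero_iff.mp hPl
      subst hnil
      have heval : pvALoop move_set g (fuel + 1) d [] tried = none := by
        simp [pvALoop]
      rw [heval]
      refine ⟨fun d' h => by simp at h, fun _ n hr => ?_⟩
      have hs : s ∈ tried := by
        rcases I6 with h | h
        · exact h
        · simp at h
      have hcl : ∀ p ∈ tried, ∀ x, pvNbr move_set p x → x ∈ tried := by
        intro p hp x hnb
        rcases I5 p hp x hnb with h | h
        · exact h
        · simp at h
      obtain ⟨k, hk, hrk⟩ := I3 g (pv_reach_closed move_set s tried hs hcl n g hr)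
      exact I4 k hk hrk
    · by_cases hgPl : g ∈ Pl
      · simp only [pvALoop, if_neg hPl,
          pv_aLevel_found move_set g Pl tried PySem.Set.empty hgPl]
        show pvAns move_set s g (some d)
        refine ⟨fun d' h => ?_, fun h => by simp at h⟩
        injection h with h
        subst h
        exact ⟨I1 g hgPl, fun k hk => I4 k hk⟩
      · obtain ⟨tried', next', heq, c1, c2, c3, c4, c5⟩ :=
          pv_aLevel_spec move_set g Pl tried PySem.Set.empty hgPl
        simp only [pvALoop, if_neg hPl, heq]
        show pvAns move_set s g (pvALoop move_set g fuel (d + 1) next' tried')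
        have J1 : ∀ p ∈ next', pvReach move_set s (d + 1) p := by
          intro x hx
          rcases c2 x hx with h | ⟨q, hq, hnb, _⟩
          · simp [PySem.Set.empty] at h
          · exact (I1 q hq).succ hnb
        have J3 : ∀ p ∈ tried', ∃ k, k < d + 1 ∧ pvReach move_set s k p := by
          intro x hx
          rcases (c1 x).mp hx with h | h
          · obtain ⟨k, hk, hrk⟩ := I3 x h
            exact ⟨k, by omega, hrk⟩
          · exact ⟨d, by omega, I1 x h⟩
        have J4 : ∀ k, k < d + 1 → ¬ pvReach move_set s k g := by
          intro k hk hr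
          by_cases hkd : k < d
          · exact I4 k hkd hr
          · have hkdeq : k = d := by omega
            subst hkdeq
            obtain ⟨k', hk', hmin⟩ := pv_min_exists hr
            rcases eq_or_lt_of_le hk' with rfl | hlt
            · exact hgPl (I2 g hmin)
            · exact I4 k' hlt hmin.1
        have J5 : ∀ p ∈ tried', ∀ x, pvNbr move_set p x → x ∈ tried' ∨ x ∈ next' := by
          intro p hp x hnb
          rcases (c1 p).mp hp with h | h
          · rcases I5 p h x hnb with h' | h'
            · exact Or.inl ((c1 x).mpr (Or.inl h'))
            · exact Or.inl ((c1 x).mpr (Or.inr h'))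
          · rcases c3 p h x hnb with h' | h' | h'
            · exact Or.inr h'
            · exact Or.inl ((c1 x).mpr (Or.inl h'))
            · exact Or.inl ((c1 x).mpr (Or.inr h'))
        have J6 : s ∈ tried' ∨ s ∈ next' := by
          left
          apply (c1 s).mpr
          rcases I6 with h | h
          · exact Or.inl h
          · exact Or.inr h
        have J7 : ∀ p ∈ tried', p ∈ pvU s := by
          intro p hp
          rcases (c1 p).mp hp with h | h
          · exact I7 p h
          · exact I7b p h
        have J7b : ∀ p ∈ next', p ∈ pvU s := by
          intro x hx
          rcases c2 x hx with h | ⟨q, hq, hnb, _⟩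
          · simp [PySem.Set.empty] at h
          · exact pv_nbr_mem_U s hnb
        have J8 : ∀ p k, pvMinLvl move_set s k p → k < d + 1 → p ∈ tried' := by
          intro p k hmin hk
          apply (c1 p).mpr
          by_cases h : k < d
          · exact Or.inl (I8 p k hmin h)
          · have hkdeq : k = d := by omega
            subst hkdeq
            exact Or.inr (I2 p hmin)
        have JN : tried'.Nodup := c5 IN
        have J2 : ∀ p, pvMinLvl move_set s (d + 1) p → p ∈ next' := by
          intro x hx
          obtain ⟨q, hq, hnb⟩ := pv_reach_succ_inv hx.1 (by omega)
          rw [show d + 1 - 1 = d by omega] at hq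
          obtain ⟨k, hkle, hkmin⟩ := pv_min_exists hq
          have hresolve : x ∈ next' ∨ x ∈ tried ∨ x ∈ Pl := by
            rcases eq_or_lt_of_le hkle with rfl | hlt
            · exact c3 q (I2 q hkmin) x hnb
            · rcases I5 q (I8 q k hkmin hlt) x hnb with h | h
              · exact Or.inr (Or.inl h)
              · exact Or.inr (Or.inr h)
          rcases hresolve with h | h | h
          · exact h
          · obtain ⟨k', hk', hrk'⟩ := I3 x h
            exact absurd hrk' (hx.2 k' (by omega))
          · exact absurd (I1 x h) (hx.2 d (by omega))
        by_cases hgrow : ∀ x ∈ Pl, x ∈ tried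
        · have hnil : next' = [] := by
            cases hne : next' with
            | nil => rfl
            | cons a t =>
              exfalso
              have ha : a ∈ next' := by
                rw [hne]
                exact List.mem_cons_self ..
              rcases c2 a ha with h | ⟨q, hq, hnb, hnt⟩
              · simp [PySem.Set.empty] at h
              · rcases I5 q (hgrow q hq) a hnb with h | h
                · exact hnt h
                · exact hnt (hgrow a h)
          rw [hnil]
          obtain ⟨f', rfl⟩ : ∃ f', fuel = f' + 1 := ⟨fuel - 1, by omega⟩
          have heval : pvALoop move_set g (f' + 1) (d + 1) [] tried' = none := by
            simp [pvALoop]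
          rw [heval]
          refine ⟨fun d' h => by simp at h, fun _ n hr => ?_⟩
          have hs : s ∈ tried' := by
            rcases J6 with h | h
            · exact h
            · rw [hnil] at h
              simp at h
          have hcl : ∀ p ∈ tried', ∀ x, pvNbr move_set p x → x ∈ tried' := by
            intro p hp x hnb
            rcases J5 p hp x hnb with h | h
            · exact h
            · rw [hnil] at h
              simp at h
          obtain ⟨k, hk, hrk⟩ := J3 g (pv_reach_closed move_set s tried' hs hcl n g hr)
          exact J4 k hk hrk
        · obtain ⟨x0, hx0Pl, hx0t⟩ : ∃ x ∈ Pl, x ∉ tried := by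
            by_contra hnone
            exact hgrow (fun x hx => by
              by_contra hxn
              exact hnone ⟨x, hx, hxn⟩)
          have hsub : (x0 :: tried) ⊆ tried' := by
            intro y hy
            rcases List.mem_cons.mp hy with rfl | hy
            · exact (c1 y).mpr (Or.inr hx0Pl)
            · exact (c1 y).mpr (Or.inl hy)
          have hnd : (x0 :: tried).Nodup := by
            rw [List.nodup_cons]
            exact ⟨hx0t, IN⟩
          have hlen1 : tried.length + 1 ≤ tried'.length := by
            have := (List.subperm_of_subset hnd hsub).length_le
            simpa using this
          have hlen2 : tried'.length ≤ (pvU s).length :=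
            (List.subperm_of_subset JN (fun y hy => J7 y hy)).length_le
          exact ih (d + 1) next' tried' (by omega) J1 J2 J3 J4 J5 J6 J7 J7b J8 JN (by omega)

lemma pv_bFold_spec (move_set : List (Int × Int)) (pos : Int × Int) (dist : Int) :
    ∀ (l : List (Int × Int)) (q0 : List ((Int × Int) × Int)) (v0 : PySem.Set (Int × Int)),
    ∃ app : List ((Int × Int) × Int),
      (l.foldl
          (fun (st : List ((Int × Int) × Int) × PySem.Set (Int × Int)) move =>
            let nxt : Int × Int := (move.1 + pos.1, move.2 + pos.2)
            if (decide (0 ≤ nxt.1) && decide (nxt.1 < 8) &&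
                decide (0 ≤ nxt.2) && decide (nxt.2 < 8) &&
                !(PySem.Set.contains st.2 nxt)) then
              (st.1 ++ [(nxt, dist + 1)], PySem.Set.add st.2 nxt)
            else st)
          (q0, v0)) = (q0 ++ app, v0 ++ app.map Prod.fst) ∧
      (∀ e ∈ app, e.2 = dist + 1 ∧
        (∃ m ∈ l, e.1 = (m.1 + pos.1, m.2 + pos.2)) ∧
        0 ≤ e.1.1 ∧ e.1.1 < 8 ∧ 0 ≤ e.1.2 ∧ e.1.2 < 8) ∧
      (∀ x, (∃ m ∈ l, x = (m.1 + pos.1, m.2 + pos.2) ∧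
          0 ≤ x.1 ∧ x.1 < 8 ∧ 0 ≤ x.2 ∧ x.2 < 8) →
        x ∈ v0 ∨ x ∈ app.map Prod.fst) ∧
      (v0.Nodup → (v0 ++ app.map Prod.fst).Nodup) := by
  intro l
  induction l with
  | nil =>
    intro q0 v0
    refine ⟨[], by simp, by simp, ?_, by simp⟩
    rintro x ⟨m, hm, _⟩
    simp at hm
  | cons m l ih =>
    intro q0 v0
    simp only [List.foldl_cons]
    by_cases hc : (decide (0 ≤ m.1 + pos.1) &&
        decide (m.1 + pos.1 < 8) &&
        decide (0 ≤ m.2 + pos.2) &&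
        decide (m.2 + pos.2 < 8) &&
        !(PySem.Set.contains v0 (m.1 + pos.1, m.2 + pos.2))) = true
    · have hb : 0 ≤ m.1 + pos.1 ∧ m.1 + pos.1 < 8 ∧ 0 ≤ m.2 + pos.2 ∧ m.2 + pos.2 < 8 ∧
          (m.1 + pos.1, m.2 + pos.2) ∉ v0 := by
        simp only [Bool.and_eq_true, decide_eq_true_eq, Bool.not_eq_true'] at hc
        refine ⟨hc.1.1.1.1, hc.1.1.1.2, hc.1.1.2, hc.1.2, fun hmem => ?_⟩
        rw [← pv_contains_iff] at hmem
        rw [hmem] at hc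
        exact absurd hc.2 (by simp)
      rw [if_pos hc, pv_add_not_mem v0 _ hb.2.2.2.2]
      obtain ⟨app, heq, h1, h2, h3⟩ :=
        ih (q0 ++ [((m.1 + pos.1, m.2 + pos.2), dist + 1)]) (v0 ++ [(m.1 + pos.1, m.2 + pos.2)])
      refine ⟨((m.1 + pos.1, m.2 + pos.2), dist + 1) :: app, ?_, ?_, ?_, ?_⟩
      · rw [heq]
        simp
      · intro e he
        rcases List.mem_cons.mp he with rfl | he'
        · exact ⟨rfl, ⟨m, List.mem_cons_self .., rfl⟩, hb.1, hb.2.1, hb.2.2.1, hb.2.2.2.1⟩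
        · obtain ⟨ha, ⟨m', hm', hme⟩, hbb⟩ := h1 e he'
          exact ⟨ha, ⟨m', List.mem_cons_of_mem _ hm', hme⟩, hbb⟩
      · rintro x ⟨m', hm', hxe, hxb⟩
        rcases List.mem_cons.mp hm' with rfl | hm'
        · right
          rw [hxe]
          simp
        · rcases h2 x ⟨m', hm', hxe, hxb⟩ with h | h
          · rcases List.mem_append.mp h with h' | h'
            · exact Or.inl h'
            · right
              simp only [List.mem_singleton] at h'
              subst h'
              simp
          · right
            simp only [List.map_cons]
            exact List.mem_cons_of_mem _ h
      · intro hv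
        have hv' : (v0 ++ [(m.1 + pos.1, m.2 + pos.2)]).Nodup := by
          rw [List.nodup_append]
          refine ⟨hv, by simp, ?_⟩
          intro a ha b hbm
          simp only [List.mem_singleton] at hbm
          subst hbm
          intro hab
          exact hb.2.2.2.2 (hab ▸ ha)
        have := h3 hv'
        simpa [List.append_assoc] using this
    · rw [if_neg hc]
      obtain ⟨app, heq, h1, h2, h3⟩ := ih q0 v0
      refine ⟨app, heq, ?_, ?_, h3⟩
      · intro e he
        obtain ⟨ha, ⟨m', hm', hme⟩, hbb⟩ := h1 e he
        exact ⟨ha, ⟨m', List.mem_cons_of_mem _ hm', hme⟩, hbb⟩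
      · rintro x ⟨m', hm', hxe, hxb⟩
        rcases List.mem_cons.mp hm' with rfl | hm'
        · left
          have hcf : PySem.Set.contains v0 x = true := by
            cases hcc : PySem.Set.contains v0 x with
            | true => rfl
            | false =>
              exfalso
              apply hc
              obtain ⟨b1, b2, b3, b4⟩ := hxb
              rw [hxe] at hcc b1 b2 b3 b4
              simp only at b1 b2 b3 b4
              simp only [hcc, Bool.not_false, Bool.and_true, Bool.and_eq_true,
                decide_eq_true_eq]
              exact ⟨⟨⟨b1, b2⟩, b3⟩, b4⟩
          exact (pv_contains_iff _ _).mp hcf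
        · rcases h2 x ⟨m', hm', hxe, hxb⟩ with h | h
          · exact Or.inl h
          · exact Or.inr h

lemma pv_bLoop_correct (move_set : List (Int × Int)) (s g : Int × Int) :
    ∀ (fuel : Nat) (queue : List ((Int × Int) × Int)) (visited : PySem.Set (Int × Int))
      (Pp : List (Int × Int)) (dcur : Int),
    0 ≤ dcur →
    (∀ x, x ∈ visited ↔ x ∈ Pp ∨ x ∈ queue.map Prod.fst) →
    (∀ e ∈ queue, pvMinLvl move_set s e.2 e.1) →
    queue.Pairwise (fun a b => a.2 ≤ b.2) →
    (∀ e ∈ queue, dcur ≤ e.2 ∧ e.2 ≤ dcur + 1) →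
    (∀ p ∈ Pp, ∀ x, pvNbr move_set p x → x ∈ visited) →
    (∀ p ∈ Pp, p ≠ g) →
    (∀ x k, pvMinLvl move_set s k x → k ≤ dcur → x ∈ visited) →
    s ∈ visited →
    (∀ x ∈ visited, x ∈ pvU s) →
    visited.Nodup →
    queue.length + 2 * ((pvU s).length - visited.length) + 1 ≤ fuel →
    pvAns move_set s g (pvBLoop move_set g fuel queue visited) := by
  intro fuel
  induction fuel with
  | zero =>
    intro queue visited Pp dcur _ _ _ _ _ _ _ _ _ _ _ HF
    exact absurd HF (by omega)
  | succ fuel ih =>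
    intro queue visited Pp dcur K0 K1 K2 K3 K4 K5 K6 K8 K9 K10 KN HF
    cases queue with
    | nil =>
      show pvAns move_set s g none
      refine ⟨fun d h => by simp at h, fun _ n hr => ?_⟩
      have hcl : ∀ p ∈ visited, ∀ x, pvNbr move_set p x → x ∈ visited := by
        intro p hp x hnb
        rcases (K1 p).mp hp with h | h
        · exact K5 p h x hnb
        · simp at h
      rcases (K1 g).mp (pv_reach_closed move_set s visited K9 hcl n g hr) with h | h
      · exact K6 g h rfl
      · simp at h
    | cons e rest =>
      obtain ⟨pos, dist⟩ := e
      have hhead := K2 (pos, dist) (List.mem_cons_self ..)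
      by_cases hpg : pos = g
      · simp only [pvBLoop]
        rw [if_pos hpg]
        show pvAns move_set s g (some dist)
        refine ⟨fun d h => ?_, fun h => by simp at h⟩
        injection h with h
        subst h
        exact hpg ▸ hhead
      · obtain ⟨app, heq, happ, hcompl, hnd⟩ := pv_bFold_spec move_set pos dist move_set rest visited
        simp only [pvBLoop, if_neg hpg]
        show pvAns move_set s g (pvBLoop move_set g fuel
          (move_set.foldl _ (rest, visited)).1 (move_set.foldl _ (rest, visited)).2)
        rw [heq]
        show pvAns move_set s g (pvBLoop move_set g fuel (rest ++ app)
          (visited ++ app.map Prod.fst))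
        have hd0 : 0 ≤ dist := pv_reach_nonneg hhead.1
        obtain ⟨hdl, hdu⟩ := K4 (pos, dist) (List.mem_cons_self ..)
        obtain ⟨hK3a, hK3b⟩ := List.pairwise_cons.mp K3
        have hdisj : ∀ x ∈ app.map Prod.fst, x ∉ visited := by
          have h := List.nodup_append.mp (hnd KN)
          intro x hx hxv
          exact h.2.2 x hxv x hx rfl
        have happnbr : ∀ e ∈ app, e.2 = dist + 1 ∧ pvNbr move_set pos e.1 := by
          intro e he
          obtain ⟨h1, ⟨m, hm, hme⟩, hb1, hb2, hb3, hb4⟩ := happ e he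
          exact ⟨h1, ⟨m, hm, hme, hb1, hb2, hb3, hb4⟩⟩
        have hcompl' : ∀ x, pvNbr move_set pos x → x ∈ visited ∨ x ∈ app.map Prod.fst := by
          intro x hx
          obtain ⟨m, hm, hxe, hb1, hb2, hb3, hb4⟩ := hx
          exact hcompl x ⟨m, hm, hxe, hb1, hb2, hb3, hb4⟩
        have hlev : ∀ x k, pvMinLvl move_set s k x → k ≤ dist → x ∈ visited := by
          intro x k hx hk
          by_cases hkd : k ≤ dcur
          · exact K8 x k hx hkd
          · obtain ⟨q, hq, hnb⟩ := pv_reach_succ_inv hx.1 (by omega)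
            obtain ⟨k'', hk''le, hqmin⟩ := pv_min_exists hq
            have hqv : q ∈ visited := K8 q k'' hqmin (by omega)
            rcases (K1 q).mp hqv with hPp | hQ
            · exact K5 q hPp x hnb
            · exfalso
              obtain ⟨e, he, hefst⟩ := List.mem_map.mp hQ
              rcases List.mem_cons.mp he with rfl | he'
              · exact hhead.2 k'' (by omega) (hefst ▸ hqmin.1)
              · exact (K2 e (List.mem_cons_of_mem _ he')).2 k''
                  (by have := hK3a e he'; omega) (hefst ▸ hqmin.1)
        refine ih (rest ++ app) (visited ++ app.map Prod.fst) (Pp ++ [pos]) dist hd0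
          ?_ ?_ ?_ ?_ ?_ ?_ ?_ ?_ ?_ ?_ ?_
        · intro x
          rw [List.mem_append, K1 x]
          simp only [List.map_cons, List.mem_cons, List.map_append, List.mem_append]
          tauto
        · intro e he
          rcases List.mem_append.mp he with h | h
          · exact K2 e (List.mem_cons_of_mem _ h)
          · obtain ⟨h1, hnb⟩ := happnbr e h
            rw [h1]
            refine ⟨hhead.1.succ hnb, ?_⟩
            intro j hj hrj
            obtain ⟨k', hk'le, hk'min⟩ := pv_min_exists hrj
            exact hdisj e.1 (List.mem_map.mpr ⟨e, h, rfl⟩)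
              (hlev e.1 k' hk'min (by omega))
        · rw [List.pairwise_append]
          refine ⟨hK3b, ?_, ?_⟩
          · apply List.pairwise_of_forall_mem_list
            intro a ha b hb
            rw [(happnbr a ha).1, (happnbr b hb).1]
          · intro a ha b hb
            have h1 := (K4 a (List.mem_cons_of_mem _ ha)).2
            rw [(happnbr b hb).1]
            omega
        · intro e he
          rcases List.mem_append.mp he with h | h
          · have h1 := hK3a e h
            have h2 := (K4 e (List.mem_cons_of_mem _ h)).2
            omega
          · rw [(happnbr e h).1]
            omega
        · intro p hp x hnb
          rcases List.mem_append.mp hp with h | h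
          · exact List.mem_append.mpr (Or.inl (K5 p h x hnb))
          · simp only [List.mem_singleton] at h
            subst h
            rcases hcompl' x hnb with h' | h'
            · exact List.mem_append.mpr (Or.inl h')
            · exact List.mem_append.mpr (Or.inr h')
        · intro p hp
          rcases List.mem_append.mp hp with h | h
          · exact K6 p h
          · simp only [List.mem_singleton] at h
            subst h
            exact hpg
        · intro x k hmin hk
          exact List.mem_append.mpr (Or.inl (hlev x k hmin hk))
        · exact List.mem_append.mpr (Or.inl K9)
        · intro x hx
          rcases List.mem_append.mp hx with h | h
          · exact K10 x h
          · obtain ⟨e, he, hefst⟩ := List.mem_map.mp h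
            exact hefst ▸ pv_nbr_mem_U s (happnbr e he).2
        · exact hnd KN
        · have hsub : visited ++ app.map Prod.fst ⊆ pvU s := by
            intro y hy
            rcases List.mem_append.mp hy with h | h
            · exact K10 y h
            · obtain ⟨e, he, hefst⟩ := List.mem_map.mp h
              exact hefst ▸ pv_nbr_mem_U s (happnbr e he).2
          have hlen := (List.subperm_of_subset (hnd KN) hsub).length_le
          simp only [List.length_append, List.length_cons, List.length_map] at HF hlen ⊢
          omega

-- ===== VERDICT (by name: the statement is the Claim_ definition above) =====
theorem min_moves_given_set_spec : Claim_equal_min_moves_given_set := by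
  unfold Claim_equal_min_moves_given_set
  intro move_set start goal _
  unfold Spec_min_moves_given_set
  have hA : pvAns move_set start goal (min_moves_given_set move_set start goal) := by
    rw [min_moves_given_set]
    apply pv_aLoop_correct move_set start goal 200 0 (PySem.Set.ofList [start]) PySem.Set.empty
    · omega
    · intro p hp
      rw [PySem.Set.mem_ofList] at hp
      simp only [List.mem_singleton] at hp
      subst hp; exact pvReach.zero
    · intro p hp
      rw [PySem.Set.mem_ofList]
      simp only [List.mem_singleton]
      exact pv_reach_zero hp.1 rfl
    · intro p hp; simp [PySem.Set.empty] at hp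
    · intro k hk hr; exact absurd (pv_reach_nonneg hr) (by omega)
    · intro p hp; simp [PySem.Set.empty] at hp
    · right; rw [PySem.Set.mem_ofList]; simp
    · intro p hp; simp [PySem.Set.empty] at hp
    · intro p hp
      rw [PySem.Set.mem_ofList] at hp
      simp only [List.mem_singleton] at hp
      subst hp; exact List.mem_cons_self ..
    · intro p k hmin hk; exact absurd (pv_reach_nonneg hmin.1) (by omega)
    · simp [PySem.Set.empty]
    · rw [pv_U_length]; simp [PySem.Set.empty]
  have hB : pvAns move_set start goal (min_moves_given_set_alt move_set start goal) := by
    rw [min_moves_given_set_alt]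
    apply pv_bLoop_correct move_set start goal 200 [(start, 0)] (PySem.Set.ofList [start]) [] 0
    · omega
    · intro x
      rw [PySem.Set.mem_ofList]
      simp
    · intro e he
      simp only [List.mem_singleton] at he
      subst he
      exact ⟨pvReach.zero, fun k hk hr => absurd (pv_reach_nonneg hr) (by omega)⟩
    · simp
    · intro e he
      simp only [List.mem_singleton] at he
      subst he; constructor <;> omega
    · intro p hp; simp at hp
    · intro p hp; simp at hp
    · intro x k hmin hk
      have h0 : k = 0 := by
        have := pv_reach_nonneg hmin.1; omega
      rw [PySem.Set.mem_ofList]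
      simp [pv_reach_zero hmin.1 h0]
    · rw [PySem.Set.mem_ofList]; simp
    · intro x hx
      rw [PySem.Set.mem_ofList] at hx
      simp only [List.mem_singleton] at hx
      subst hx; exact List.mem_cons_self ..
    · exact PySem.Set.nodup_ofList _
    · rw [pv_U_length]
      have h1 : PySem.Set.ofList [start] = [start] := rfl
      rw [h1]
      simp
  exact pv_ans_unique hA hB
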